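-- pv_equiv track=rewrite | github.com/mrexodia/gdbproxy | gdbproxy/dissector.py | _dissect_binary_memory_response
-- ===== SOURCE A (Python) =====
-- def _dissect_binary_memory_response(data: str) -> str:
--     """Dissect binary memory read response (b prefix)."""
--     # Response is 'b' followed by binary data (with escape sequences)
--     binary_data = data[1:]  # Skip 'b' prefix
--     # Count actual bytes (accounting for escape sequences)
--     byte_count = 0
--     i = 0
--     while i < len(binary_data):
--         if binary_data[i] == '}' and i + 1 < len(binary_data):
--             # Escaped byte: } followed by char XOR 0x20
--             byte_count += 1
--             i += 2
--         else:
--             byte_count += 1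
--             i += 1
--     return f"Binary data: {byte_count} bytes"
-- ===== SOURCE B (Python) =====
-- def _dissect_binary_memory_response(data: str) -> str:
--     """Dissect binary memory read response (b prefix)."""
--     binary_data = data[1:]  # Skip 'b' prefix
--     # Stage 1: split on '}' -- each piece after the first follows one '}'.
--     # Stage 2: per maximal run of '}' (consecutive empty pieces), compute how many
--     # escape pairs the greedy scan forms: ceil(run/2) if text follows, run//2 at end.
--     pairs = 0
--     run = 0
--     for piece in binary_data.split('}')[1:]:
--         run += 1
--         if piece:
--             pairs += (run + 1) // 2
--             run = 0
--     pairs += run // 2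
--     # Each escape pair is 2 chars for 1 byte.
--     byte_count = len(binary_data) - pairs
--     return f"Binary data: {byte_count} bytes"
-- ===== Notes on version B (the rewrite author's own statement) =====
-- stated objective: faster
-- what changed: Replaces A's per-character index-walking scan by two staged passes: split the payload on '}' once (C-implemented str.split), then compute the number of greedy escape pairs arithmetically per maximal run of '}' (ceil(run/2) when text follows, run//2 at the end) and return len(payload) minus that pair count.
import Mathlib
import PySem

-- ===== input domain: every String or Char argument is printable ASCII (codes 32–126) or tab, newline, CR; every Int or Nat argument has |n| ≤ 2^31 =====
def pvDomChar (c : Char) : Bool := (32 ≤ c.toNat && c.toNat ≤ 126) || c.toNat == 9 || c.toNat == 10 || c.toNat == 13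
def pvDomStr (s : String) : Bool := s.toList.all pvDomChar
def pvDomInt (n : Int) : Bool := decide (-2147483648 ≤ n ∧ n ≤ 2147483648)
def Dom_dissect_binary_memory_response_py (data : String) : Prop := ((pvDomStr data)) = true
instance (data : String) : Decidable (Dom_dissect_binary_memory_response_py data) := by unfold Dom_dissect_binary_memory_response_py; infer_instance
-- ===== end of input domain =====

-- B replaces A's per-character index scan by split-on-'}' plus per-run arithmetic on
-- the escape pairs (a genuinely different decomposition of the same O(n) count).

-- ===== PORT A =====
-- A's while loop: index i over binary_data, byte_count += 1, i advances by 2 on an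
-- escape pair '}' + char (only when i+1 is in range), else by 1.
def pvALoop (bd : List Char) (byte_count : Int) (i : Nat) : Int :=
  if i < bd.length then
    if bd[i]! = '}' ∧ i + 1 < bd.length then
      pvALoop bd (byte_count + 1) (i + 2)
    else
      pvALoop bd (byte_count + 1) (i + 1)
  else byte_count
termination_by bd.length - i

def dissect_binary_memory_response_py (data : String) : String :=
  -- binary_data = data[1:]
  "Binary data: " ++ PySem.Int.toStr (pvALoop (PySem.Chars.slice data.toList (some 1) none) 0 0) ++ " bytes"

-- ===== PORT B =====
-- binary_data.split('}') ported by hand, step for step: exact Python semantics of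
-- str.split for the one-character separator '}' (empty pieces kept, [''] on '').
def splitBrace : List Char → List (List Char)
  | [] => [[]]
  | c :: rest =>
    if c = '}' then [] :: splitBrace rest
    else match splitBrace rest with
      | p :: ps => (c :: p) :: ps
      | [] => [[c]]

-- loop body: run += 1; if piece: pairs += (run + 1) // 2; run = 0
def pvBStep (st : Int × Int) (piece : List Char) : Int × Int :=
  let run : Int := st.2 + 1
  if piece ≠ [] then (st.1 + PySem.Int.floordiv (run + 1) 2, 0) else (st.1, run)

def dissect_binary_memory_response_py_alt (data : String) : String :=
  let binary_data := PySem.Chars.slice data.toList (some 1) none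
  -- for piece in binary_data.split('}')[1:]: …
  let st := (PySem.List.slice (splitBrace binary_data) (some 1) none).foldl pvBStep (0, 0)
  -- pairs += run // 2
  let pairs := st.1 + PySem.Int.floordiv st.2 2
  let byte_count : Int := (binary_data.length : Int) - pairs
  "Binary data: " ++ PySem.Int.toStr byte_count ++ " bytes"

-- ===== PRECONDITION & SPEC =====
def Spec_dissect_binary_memory_response_py (data : String) (out : String) : Prop := out = dissect_binary_memory_response_py_alt data
instance (data : String) (out : String) : Decidable (Spec_dissect_binary_memory_response_py data out) := by unfold Spec_dissect_binary_memory_response_py; infer_instance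

-- ===== CLAIM =====
def Claim_equal_dissect_binary_memory_response_py : Prop := ∀ (data : String), Dom_dissect_binary_memory_response_py data → Spec_dissect_binary_memory_response_py data (dissect_binary_memory_response_py data)

-- ===== LEMMAS AND PROOFS =====

-- Number of escape pairs A's greedy scan forms on a payload.
def pairsOf : List Char → Int
  | [] => 0
  | [_] => 0
  | c :: d :: rest => if c = '}' then 1 + pairsOf rest else pairsOf (d :: rest)

-- Pairs formed when k pending '}'s precede the remaining payload l.
def pairsR : Nat → List Char → Int
  | k, [] => ((k / 2 : Nat) : Int)
  | k, c :: rest => if c = '}' then pairsR (k + 1) rest else (((k + 1) / 2 : Nat) : Int) + pairsOf rest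

def pvFin (st : Int × Int) : Int := st.1 + PySem.Int.floordiv st.2 2

lemma floordiv_natCast (m : Nat) : PySem.Int.floordiv (m : Int) 2 = ((m / 2 : Nat) : Int) := by
  simp only [PySem.Int.floordiv]
  exact (Int.ofNat_fdiv m 2).symm

lemma pairsOf_cons_ne (c : Char) (r : List Char) (h : c ≠ '}') : pairsOf (c :: r) = pairsOf r := by
  cases r with
  | nil => simp [pairsOf]
  | cons d r' => simp [pairsOf, h]

lemma pairsOf_replicate (m : Nat) : pairsOf (List.replicate m '}') = ((m / 2 : Nat) : Int) := by
  induction m using Nat.strong_induction_on with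
  | _ m ih =>
    match m with
    | 0 => simp [pairsOf]
    | 1 => simp [pairsOf, List.replicate]
    | (m + 2) =>
      have : List.replicate (m + 2) '}' = '}' :: '}' :: List.replicate m '}' := by
        simp [List.replicate]
      rw [this]
      show (if ('}' : Char) = '}' then 1 + pairsOf (List.replicate m '}') else _) = _
      rw [if_pos rfl, ih m (by omega)]
      have : (m + 2) / 2 = m / 2 + 1 := by omega
      rw [this]
      push_cast
      ring_nf

lemma pairsOf_replicate_append (m : Nat) (c : Char) (r : List Char) (hc : c ≠ '}') :
    pairsOf (List.replicate m '}' ++ c :: r) = (((m + 1) / 2 : Nat) : Int) + pairsOf r := by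
  induction m using Nat.strong_induction_on with
  | _ m ih =>
    match m with
    | 0 => simp [pairsOf_cons_ne c r hc]
    | 1 =>
      simp only [List.replicate, List.nil_append, List.cons_append]
      show (if ('}' : Char) = '}' then 1 + pairsOf r else _) = _
      rw [if_pos rfl]
      norm_num
    | (m + 2) =>
      have h2 : List.replicate (m + 2) '}' ++ c :: r
          = '}' :: '}' :: (List.replicate m '}' ++ c :: r) := by
        simp [List.replicate]
      rw [h2]
      show (if ('}' : Char) = '}' then 1 + pairsOf (List.replicate m '}' ++ c :: r) else _) = _
      rw [if_pos rfl, ih m (by omega)]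
      have : (m + 2 + 1) / 2 = (m + 1) / 2 + 1 := by omega
      rw [this]
      push_cast
      ring

lemma pairsR_eq (l : List Char) : ∀ k : Nat, pairsR (k + 1) l = pairsOf (List.replicate (k + 1) '}' ++ l) := by
  induction l with
  | nil => intro k; simp [pairsR, pairsOf_replicate]
  | cons c r ih =>
    intro k
    by_cases hc : c = '}'
    · subst hc
      have h2 : List.replicate (k + 1) '}' ++ '}' :: r = List.replicate (k + 2) '}' ++ r := by
        induction k with
        | zero => simp [List.replicate]
        | succ n ihk => simp [List.replicate_succ] at ihk ⊢; exact ihk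
      rw [h2]
      show pairsR (k + 2) r = _
      exact ih (k + 1)
    · simp [pairsR, hc, pairsOf_replicate_append (k + 1) c r hc]

lemma splitBrace_ne_nil (l : List Char) : splitBrace l ≠ [] := by
  cases l with
  | nil => simp [splitBrace]
  | cons c rest =>
    simp only [splitBrace]
    split
    · simp
    · cases h : splitBrace rest <;> simp

lemma pvBStep_nil (p r : Int) : pvBStep (p, r) [] = (p, r + 1) := by
  simp [pvBStep]

lemma pvBStep_cons (p r : Int) (c : Char) (cs : List Char) :
    pvBStep (p, r) (c :: cs) = (p + PySem.Int.floordiv (r + 1 + 1) 2, 0) := by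
  simp [pvBStep]

-- joint invariant for B's fold: over all parts of splitBrace l with k pending '}'s,
-- and over the tail of splitBrace l with no pending '}'.
lemma fold_main : ∀ n l, List.length l = n →
    ((∀ p : Int, pvFin (((splitBrace l).tail).foldl pvBStep (p, 0)) = p + pairsOf l) ∧
     (∀ (p : Int) (k : Nat), pvFin ((splitBrace l).foldl pvBStep (p, (k : Int))) = p + pairsR (k + 1) l)) := by
  intro n
  induction n using Nat.strong_induction_on with
  | _ n ih =>
    intro l hn
    constructor
    · intro p
      match l with
      | [] => simp [splitBrace, pvFin, pairsOf, PySem.Int.floordiv]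
      | '}' :: rest =>
        have htail : (splitBrace ('}' :: rest)).tail = splitBrace rest := by
          simp [splitBrace]
        rw [htail]
        have hA := ((ih rest.length (by simp at hn; omega) rest rfl).2) p 0
        rw [show ((0:Nat) : Int) = (0 : Int) from rfl] at hA
        rw [hA]
        rw [pairsR_eq rest 0]
        simp
      | c :: rest =>
        by_cases hc : c = '}'
        · subst hc
          have htail : (splitBrace ('}' :: rest)).tail = splitBrace rest := by
            simp [splitBrace]
          rw [htail]
          have hA := ((ih rest.length (by simp at hn; omega) rest rfl).2) p 0
          rw [show ((0:Nat) : Int) = (0 : Int) from rfl] at hA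
          rw [hA, pairsR_eq rest 0]
          simp
        · have htail : (splitBrace (c :: rest)).tail = (splitBrace rest).tail := by
            simp only [splitBrace, if_neg hc]
            cases h : splitBrace rest with
            | nil => exact absurd h (splitBrace_ne_nil rest)
            | cons q qs => simp
          rw [htail]
          have hT := ((ih rest.length (by simp at hn; omega) rest rfl).1) p
          rw [hT, pairsOf_cons_ne c rest hc]
    · intro p k
      match l with
      | [] =>
        simp only [splitBrace, List.foldl_cons, List.foldl_nil, pvBStep_nil]
        show (p : Int) + PySem.Int.floordiv ((k : Int) + 1) 2 = p + pairsR (k + 1) []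
        have : ((k : Int) + 1) = (((k + 1 : Nat)) : Int) := by push_cast; ring
        rw [this, floordiv_natCast]
        simp [pairsR]
      | c :: rest =>
        by_cases hc : c = '}'
        · subst hc
          have hsb : splitBrace ('}' :: rest) = [] :: splitBrace rest := by
            simp [splitBrace]
          rw [hsb]
          simp only [List.foldl_cons, pvBStep_nil]
          have : ((k : Int) + 1) = (((k + 1 : Nat)) : Int) := by push_cast; ring
          rw [this]
          have hA := ((ih rest.length (by simp at hn; omega) rest rfl).2) p (k + 1)
          rw [hA]
          simp [pairsR]
        · have hsb : ∃ q qs, splitBrace rest = q :: qs ∧ splitBrace (c :: rest) = (c :: q) :: qs := by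
            cases h : splitBrace rest with
            | nil => exact absurd h (splitBrace_ne_nil rest)
            | cons q qs => exact ⟨q, qs, rfl, by simp [splitBrace, hc, h]⟩
          obtain ⟨q, qs, hq, hcq⟩ := hsb
          rw [hcq]
          simp only [List.foldl_cons, pvBStep_cons]
          have hqs : qs = (splitBrace rest).tail := by rw [hq]; rfl
          rw [hqs]
          have hT := ((ih rest.length (by simp at hn; omega) rest rfl).1)
            (p + PySem.Int.floordiv ((k : Int) + 1 + 1) 2)
          rw [hT]
          have : ((k : Int) + 1 + 1) = (((k + 2 : Nat)) : Int) := by push_cast; ring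
          rw [this, floordiv_natCast]
          simp only [pairsR, if_neg hc]
          have : (k + 2) / 2 = (k + 1 + 1) / 2 := by omega
          rw [this]
          ring

-- A's loop counts length-minus-pairs of the remaining suffix.
lemma pvALoop_eq (bd : List Char) (b : Int) (i : Nat) :
    pvALoop bd b i = b + ((bd.drop i).length : Int) - pairsOf (bd.drop i) := by
  induction hn : bd.length - i using Nat.strong_induction_on generalizing b i with
  | _ n ihn =>
  rw [pvALoop]
  by_cases hi : i < bd.length
  · have hdrop : bd.drop i = bd[i] :: bd.drop (i + 1) := List.drop_eq_getElem_cons hi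
    have hbang : bd[i]! = bd[i] := getElem!_pos bd i hi
    simp only [hi, if_true, hbang]
    by_cases hc : bd[i] = '}'
    · by_cases h1 : i + 1 < bd.length
      · simp only [hc, h1, and_self, if_true]
        rw [ihn (bd.length - (i + 2)) (by omega) (b + 1) (i + 2) rfl]
        have hdrop1 : bd.drop (i + 1) = bd[i+1] :: bd.drop (i + 2) := List.drop_eq_getElem_cons h1
        have hlen : ((bd.drop i).length : Int) = ((bd.drop (i+2)).length : Int) + 2 := by
          simp [List.length_drop]; omega
        have hp : pairsOf (bd.drop i) = 1 + pairsOf (bd.drop (i + 2)) := by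
          rw [hdrop, hdrop1]
          show (if bd[i] = '}' then 1 + pairsOf (bd.drop (i+2)) else _) = _
          rw [if_pos hc]
        rw [hlen, hp]
        ring
      · simp only [hc, h1, and_false, if_false]
        have hnil : bd.drop (i + 1) = [] := List.drop_eq_nil_of_le (by omega)
        rw [ihn (bd.length - (i + 1)) (by omega) (b + 1) (i + 1) rfl]
        rw [hdrop, hnil]
        simp [pairsOf]
    · simp only [hc, false_and, if_false]
      rw [ihn (bd.length - (i + 1)) (by omega) (b + 1) (i + 1) rfl]
      have hp : pairsOf (bd.drop i) = pairsOf (bd.drop (i + 1)) := by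
        rw [hdrop]; exact pairsOf_cons_ne _ _ hc
      have hlen : (((bd.drop i).length : Int)) = ((bd.drop (i + 1)).length : Int) + 1 := by
        simp only [List.length_drop]
        omega
      rw [hp, hlen]
      ring
  · have hnil : bd.drop i = [] := List.drop_eq_nil_of_le (by omega)
    simp [hi, hnil, pairsOf]

lemma slice_one (xs : List (List Char)) : PySem.List.slice xs (some 1) none = xs.tail := by
  have h := PySem.List.slice_from (xs := xs) (a := 1) (by omega)
  simpa [List.drop_one] using h

-- ===== VERDICT =====
theorem dissect_binary_memory_response_py_spec : Claim_equal_dissect_binary_memory_response_py := by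
  intro data _
  unfold Spec_dissect_binary_memory_response_py
  simp only [dissect_binary_memory_response_py, dissect_binary_memory_response_py_alt, slice_one]
  rw [pvALoop_eq _ 0 0, List.drop_zero]
  have hB := ((fold_main (PySem.Chars.slice data.toList (some 1) none).length _ rfl).1) 0
  unfold pvFin at hB
  rw [hB]
  norm_num
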